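-- pv_equiv track=rewrite | github.com/BerkanHRGL/schadeautos | backend/scrapers/schadeautos_scraper.py | _term_to_parts
-- ===== SOURCE A (Python) =====
-- MAKE_MAP = {
--     'volkswagen': 'Volkswagen', 'vw': 'Volkswagen', 'audi': 'Audi',
--     'bmw': 'BMW', 'mercedes': 'Mercedes-Benz', 'mercedes-benz': 'Mercedes-Benz',
--     'opel': 'Opel', 'ford': 'Ford', 'renault': 'Renault', 'peugeot': 'Peugeot',
--     'citroën': 'Citroën', 'citroen': 'Citroën', 'toyota': 'Toyota',
--     'nissan': 'Nissan', 'honda': 'Honda', 'mazda': 'Mazda',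
--     'hyundai': 'Hyundai', 'kia': 'Kia', 'volvo': 'Volvo',
--     'seat': 'SEAT', 'skoda': 'Škoda', 'fiat': 'Fiat',
--     'alfa romeo': 'Alfa Romeo', 'mini': 'MINI', 'smart': 'Smart',
--     'dacia': 'Dacia', 'suzuki': 'Suzuki', 'mitsubishi': 'Mitsubishi',
--     'porsche': 'Porsche', 'tesla': 'Tesla', 'land rover': 'Land Rover',
--     'jaguar': 'Jaguar', 'jeep': 'Jeep', 'chrysler': 'Chrysler',
-- }
--
-- def _term_to_parts(term: str):
--     """Parse a search term like 'volkswagen polo' into URL slugs and proper names."""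
--     term_lower = term.lower().strip()
--
--     # Check multi-word makes first (e.g. "alfa romeo")
--     for key in sorted(MAKE_MAP.keys(), key=len, reverse=True):
--         if term_lower.startswith(key + ' '):
--             proper_make = MAKE_MAP[key]
--             make_slug = key.replace(' ', '-')
--             remainder = term_lower[len(key):].strip()
--             if remainder:
--                 model_slug = remainder.replace(' ', '-')
--                 proper_model = remainder.split()[0].title()
--                 return make_slug, model_slug, proper_make, proper_model
--
--     # Single-word make: split on first space
--     parts = term_lower.split(' ', 1)
--     if len(parts) == 2:
--         make_slug = parts[0]
--         model_slug = parts[1].replace(' ', '-')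
--         proper_make = MAKE_MAP.get(parts[0], parts[0].title())
--         proper_model = parts[1].split()[0].title()
--         return make_slug, model_slug, proper_make, proper_model
--
--     return None, None, None, None
-- ===== SOURCE B (Python) =====
-- MAKE_MAP = {
--     'volkswagen': 'Volkswagen', 'vw': 'Volkswagen', 'audi': 'Audi',
--     'bmw': 'BMW', 'mercedes': 'Mercedes-Benz', 'mercedes-benz': 'Mercedes-Benz',
--     'opel': 'Opel', 'ford': 'Ford', 'renault': 'Renault', 'peugeot': 'Peugeot',
--     'citroën': 'Citroën', 'citroen': 'Citroën', 'toyota': 'Toyota',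
--     'nissan': 'Nissan', 'honda': 'Honda', 'mazda': 'Mazda',
--     'hyundai': 'Hyundai', 'kia': 'Kia', 'volvo': 'Volvo',
--     'seat': 'SEAT', 'skoda': 'Škoda', 'fiat': 'Fiat',
--     'alfa romeo': 'Alfa Romeo', 'mini': 'MINI', 'smart': 'Smart',
--     'dacia': 'Dacia', 'suzuki': 'Suzuki', 'mitsubishi': 'Mitsubishi',
--     'porsche': 'Porsche', 'tesla': 'Tesla', 'land rover': 'Land Rover',
--     'jaguar': 'Jaguar', 'jeep': 'Jeep', 'chrysler': 'Chrysler',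
-- }
--
--
-- def _term_to_parts(term: str):
--     """Parse a search term like 'volkswagen polo' into URL slugs and proper names."""
--     t = term.lower().strip()
--     parts = t.split(' ', 1)
--     if len(parts) != 2:
--         return None, None, None, None
--     head, tail = parts
--     # Two-word make ("alfa romeo", "land rover"): first two words key MAKE_MAP
--     # directly, provided a model word remains after them.
--     rest2 = tail.split(' ', 1)
--     if len(rest2) == 2:
--         two_key = head + ' ' + rest2[0]
--         if two_key in MAKE_MAP:
--             model = rest2[1].strip()
--             if model:
--                 return (two_key.replace(' ', '-'), model.replace(' ', '-'),
--                         MAKE_MAP[two_key], model.split()[0].title())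
--     # Single-word known make: the model is everything after it.
--     if head in MAKE_MAP:
--         model = tail.strip()
--         if model:
--             return (head, model.replace(' ', '-'),
--                     MAKE_MAP[head], model.split()[0].title())
--     # Unknown make: slug the words as they stand.
--     return (head, tail.replace(' ', '-'),
--             MAKE_MAP.get(head, head.title()),
--             tail.split()[0].title())
-- ===== Notes on version B (the rewrite author's own statement) =====
-- stated objective: simpler
-- what changed: A sorts all MAKE_MAP keys by length and scans them with startswith on every call; B instead splits the term once at the first blank and looks the first one or two words up directly in the dict.
import Mathlib
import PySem

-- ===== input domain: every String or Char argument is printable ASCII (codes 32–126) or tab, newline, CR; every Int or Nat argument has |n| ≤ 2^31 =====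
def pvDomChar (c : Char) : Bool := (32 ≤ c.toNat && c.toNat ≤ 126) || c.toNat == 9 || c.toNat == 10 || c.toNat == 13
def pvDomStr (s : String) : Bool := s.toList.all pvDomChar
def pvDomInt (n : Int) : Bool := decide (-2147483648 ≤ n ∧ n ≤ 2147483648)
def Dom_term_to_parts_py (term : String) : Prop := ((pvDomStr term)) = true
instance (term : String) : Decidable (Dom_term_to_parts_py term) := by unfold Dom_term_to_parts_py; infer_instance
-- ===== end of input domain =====

-- B replaces A's sort-the-keys-by-length-and-scan-with-startswith loop by direct dict
-- lookups of the first one or two words of the term (objective: simpler).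

-- shared module constant MAKE_MAP (Python dict str -> str; keys/values as char lists)
def pvMakeMap : PySem.Dict (List Char) (List Char) :=
  PySem.Dict.ofList [
    ("volkswagen".toList, "Volkswagen".toList), ("vw".toList, "Volkswagen".toList),
    ("audi".toList, "Audi".toList), ("bmw".toList, "BMW".toList),
    ("mercedes".toList, "Mercedes-Benz".toList), ("mercedes-benz".toList, "Mercedes-Benz".toList),
    ("opel".toList, "Opel".toList), ("ford".toList, "Ford".toList),
    ("renault".toList, "Renault".toList), ("peugeot".toList, "Peugeot".toList),
    ("citroën".toList, "Citroën".toList), ("citroen".toList, "Citroën".toList),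
    ("toyota".toList, "Toyota".toList), ("nissan".toList, "Nissan".toList),
    ("honda".toList, "Honda".toList), ("mazda".toList, "Mazda".toList),
    ("hyundai".toList, "Hyundai".toList), ("kia".toList, "Kia".toList),
    ("volvo".toList, "Volvo".toList), ("seat".toList, "SEAT".toList),
    ("skoda".toList, "Škoda".toList), ("fiat".toList, "Fiat".toList),
    ("alfa romeo".toList, "Alfa Romeo".toList), ("mini".toList, "MINI".toList),
    ("smart".toList, "Smart".toList), ("dacia".toList, "Dacia".toList),
    ("suzuki".toList, "Suzuki".toList), ("mitsubishi".toList, "Mitsubishi".toList),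
    ("porsche".toList, "Porsche".toList), ("tesla".toList, "Tesla".toList),
    ("land rover".toList, "Land Rover".toList), ("jaguar".toList, "Jaguar".toList),
    ("jeep".toList, "Jeep".toList), ("chrysler".toList, "Chrysler".toList)]

-- str.title(): hand-ported (PySem has no title); exact on the ASCII domain, where
-- Python's cased characters are exactly the letters a-z/A-Z
def pvTitleGo (prev : Bool) : List Char → List Char
  | [] => []
  | c :: rest =>
    (if PySem.Chars.isalpha c then
       (if prev then PySem.Chars.lowerChar c else PySem.Chars.upperChar c)
     else c) :: pvTitleGo (PySem.Chars.isalpha c) rest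

def pvTitle (cs : List Char) : List Char := pvTitleGo false cs

-- cs.split()[0].title(); the [0] would raise IndexError on a wordless cs, which is
-- unreachable here (cs always ends in a non-space character) — headD [] stands in
def pvTitleFirst (cs : List Char) : List Char := pvTitle ((PySem.Chars.split₀ cs).headD [])

-- ===== PORT A =====
-- the for-loop over sorted(MAKE_MAP.keys(), key=len, reverse=True) with early return;
-- proper_make is MAKE_MAP[key] (key comes from MAKE_MAP.keys(), so never missing: getD)
def pvLoopA (t : List Char) : List (List Char) → Option (List Char × List Char × List Char × List Char)
  | [] => none
  | k :: ks =>
    if PySem.Chars.startswith t (k ++ [' ']) then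
      if PySem.Chars.strip (PySem.Chars.slice t (some (k.length : Int))) ≠ [] then
        some (PySem.Chars.replace k [' '] ['-'],
              PySem.Chars.replace (PySem.Chars.strip (PySem.Chars.slice t (some (k.length : Int)))) [' '] ['-'],
              pvMakeMap.getD k [],
              pvTitleFirst (PySem.Chars.strip (PySem.Chars.slice t (some (k.length : Int)))))
      else pvLoopA t ks
    else pvLoopA t ks

-- what A returns once the loop is over: an early return's payload, or the code after the loop
def pvAfterLoopA (t : List Char) : Option (List Char × List Char × List Char × List Char) →
    Option String × Option String × Option String × Option String
  | some (a, b, c, d) => (some (String.ofList a), some (String.ofList b), some (String.ofList c), some (String.ofList d))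
  | none =>
    match PySem.Chars.splitOnMax t [' '] 1 with   -- term_lower.split(' ', 1); sep ≠ '' never raises
    | [p0, p1] =>
        (some (String.ofList p0), some (String.ofList (PySem.Chars.replace p1 [' '] ['-'])),
         some (String.ofList (pvMakeMap.getD p0 (pvTitle p0))), some (String.ofList (pvTitleFirst p1)))
    | _ => (none, none, none, none)

def pvMainA (t : List Char) : Option String × Option String × Option String × Option String :=
  pvAfterLoopA t (pvLoopA t (PySem.List.sorted pvMakeMap.keys (fun k => k.length) true))

def term_to_parts_py (term : String) : Option String × Option String × Option String × Option String :=
  pvMainA (PySem.Chars.strip (PySem.Chars.lower term.toList))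

-- ===== PORT B =====
def pvWrapB (r : List Char × List Char × List Char × List Char) :
    Option String × Option String × Option String × Option String :=
  (some (String.ofList r.1), some (String.ofList r.2.1), some (String.ofList r.2.2.1), some (String.ofList r.2.2.2))

-- Source B's final return: unknown make
def pvFallB (head tail : List Char) : List Char × List Char × List Char × List Char :=
  (head, PySem.Chars.replace tail [' '] ['-'], pvMakeMap.getD head (pvTitle head), pvTitleFirst tail)

-- Source B's single-word-make branch falling through to the final return
def pvSingleB (head tail : List Char) : List Char × List Char × List Char × List Char :=
  if pvMakeMap.contains head then
    if PySem.Chars.strip tail ≠ [] then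
      (head, PySem.Chars.replace (PySem.Chars.strip tail) [' '] ['-'],
       pvMakeMap.getD head [], pvTitleFirst (PySem.Chars.strip tail))
    else pvFallB head tail
  else pvFallB head tail

def pvMainB (t : List Char) : Option String × Option String × Option String × Option String :=
  match PySem.Chars.splitOnMax t [' '] 1 with   -- t.split(' ', 1)
  | [head, tail] =>
    pvWrapB
      (match PySem.Chars.splitOnMax tail [' '] 1 with   -- tail.split(' ', 1)
       | [w, rest] =>
         if pvMakeMap.contains (head ++ ' ' :: w) then
           if PySem.Chars.strip rest ≠ [] then
             (PySem.Chars.replace (head ++ ' ' :: w) [' '] ['-'],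
              PySem.Chars.replace (PySem.Chars.strip rest) [' '] ['-'],
              pvMakeMap.getD (head ++ ' ' :: w) [], pvTitleFirst (PySem.Chars.strip rest))
           else pvSingleB head tail
         else pvSingleB head tail
       | _ => pvSingleB head tail)
  | _ => (none, none, none, none)

def term_to_parts_py_alt (term : String) : Option String × Option String × Option String × Option String :=
  pvMainB (PySem.Chars.strip (PySem.Chars.lower term.toList))

-- ===== PRECONDITION & SPEC =====
def Spec_term_to_parts_py (term : String) (out : Option String × Option String × Option String × Option String) : Prop := out = term_to_parts_py_alt term
instance (term : String) (out : Option String × Option String × Option String × Option String) : Decidable (Spec_term_to_parts_py term out) := by unfold Spec_term_to_parts_py; infer_instance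

-- ===== CLAIM (what is proved, stated in full; the proofs are below) =====
def Claim_equal_term_to_parts_py : Prop := ∀ (term : String), Dom_term_to_parts_py term → Spec_term_to_parts_py term (term_to_parts_py term)

-- ===== LEMMAS AND PROOFS =====
set_option maxRecDepth 16384

-- every string decomposes at its first space, or has none
theorem pv_firstSpace (t : List Char) :
    (' ' ∉ t) ∨ ∃ h r, t = h ++ ' ' :: r ∧ ' ' ∉ h := by
  induction t with
  | nil => left; simp
  | cons c t ih =>
    by_cases hc : c = ' '
    · right; exact ⟨[], t, by simp [hc], by simp⟩
    · rcases ih with hns | ⟨h, r, rfl, hh⟩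
      · left
        intro hm
        rcases List.mem_cons.mp hm with h' | h'
        · exact hc (Eq.symm h')
        · exact hns h'
      · right
        refine ⟨c :: h, r, rfl, ?_⟩
        intro hm
        rcases List.mem_cons.mp hm with h' | h'
        · exact hc (Eq.symm h')
        · exact hh h'

-- first-space decomposition is determined by prefixes
theorem pv_splitEq {a b x y : List Char} (ha : ' ' ∉ a) (hb : ' ' ∉ b)
    (h : (a ++ ' ' :: x) <+: (b ++ ' ' :: y)) : a = b ∧ x <+: y := by
  induction a generalizing b with
  | nil =>
    cases b with
    | nil => simpa using h
    | cons d bs =>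
      simp only [List.nil_append, List.cons_append, List.cons_prefix_cons] at h
      exact absurd (h.1 ▸ List.mem_cons_self ..) hb
  | cons c as ih =>
    cases b with
    | nil =>
      simp only [List.cons_append, List.nil_append, List.cons_prefix_cons] at h
      exact absurd (h.1 ▸ List.mem_cons_self ..) ha
    | cons d bs =>
      simp only [List.cons_append, List.cons_prefix_cons] at h
      obtain ⟨rfl, h2⟩ := h
      have := ih (fun hs => ha (List.mem_cons_of_mem _ hs))
        (fun hs => hb (List.mem_cons_of_mem _ hs)) h2
      exact ⟨by rw [this.1], this.2⟩

theorem pv_sp {a b y : List Char} (ha : ' ' ∉ a) (hb : ' ' ∉ b) :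
    (a ++ [' ']) <+: (b ++ ' ' :: y) ↔ a = b := by
  constructor
  · intro h
    exact (pv_splitEq ha hb (x := []) (by simpa using h)).1
  · rintro rfl
    have he : a ++ ' ' :: y = (a ++ [' ']) ++ y := by simp
    rw [he]; exact List.prefix_append _ _

theorem pv_eqSplit {a b x y : List Char} (ha : ' ' ∉ a) (hb : ' ' ∉ b)
    (h : a ++ ' ' :: x = b ++ ' ' :: y) : a = b ∧ x = y := by
  have h1 := pv_splitEq ha hb (by rw [h])
  obtain ⟨rfl, -⟩ := h1
  exact ⟨rfl, by simpa using List.append_cancel_left h⟩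

-- ---- split(' ', 1) ----
theorem pv_isp (c : Char) (rest : List Char) : ([' ']).isPrefixOf (c :: rest) = (' ' == c) := by
  simp [List.isPrefixOf]

theorem pv_nesp {c : Char} {rest : List Char} (h : ' ' ∉ c :: rest) : ¬ ((' ' == c) = true) := by
  simp only [beq_iff_eq]
  intro he
  exact h (he ▸ List.mem_cons_self ..)

theorem pv_notin_tail {c : Char} {rest : List Char} (h : ' ' ∉ c :: rest) : ' ' ∉ rest :=
  fun hs => h (List.mem_cons_of_mem _ hs)

theorem pv_go_zero (f : Nat) (l cur : List Char) (acc : List (List Char)) :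
    PySem.Chars.splitOnMax.go [' '] f 0 l cur acc = ((cur.reverse ++ l) :: acc).reverse := by
  cases f with
  | zero => rfl
  | succ f =>
    cases l with
    | nil => show (cur.reverse :: acc).reverse = _; simp
    | cons c rest => rfl

theorem pv_go_step (f : Nat) (c : Char) (rest cur : List Char) (acc : List (List Char)) :
    PySem.Chars.splitOnMax.go [' '] (f+1) 1 (c::rest) cur acc =
      if ([' ']).isPrefixOf (c::rest) then PySem.Chars.splitOnMax.go [' '] f 0 rest [] (cur.reverse :: acc)
      else PySem.Chars.splitOnMax.go [' '] f 1 rest (c::cur) acc := rfl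

theorem pv_go_nospace (f : Nat) (l cur : List Char) (acc : List (List Char))
    (hf : l.length < f) (hl : ' ' ∉ l) :
    PySem.Chars.splitOnMax.go [' '] f 1 l cur acc = ((cur.reverse ++ l) :: acc).reverse := by
  induction f generalizing l cur with
  | zero => omega
  | succ f ih =>
    cases l with
    | nil => show (cur.reverse :: acc).reverse = _; simp
    | cons c rest =>
      rw [pv_go_step, pv_isp, if_neg (pv_nesp hl)]
      rw [ih rest (c :: cur) (by simpa using Nat.lt_of_succ_lt_succ hf) (pv_notin_tail hl)]
      simp

theorem pv_go_split (h : List Char) (f : Nat) (r cur : List Char) (acc : List (List Char))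
    (hf : h.length < f) (hh : ' ' ∉ h) :
    PySem.Chars.splitOnMax.go [' '] f 1 (h ++ ' ' :: r) cur acc =
      (r :: (cur.reverse ++ h) :: acc).reverse := by
  induction h generalizing f cur with
  | nil =>
    cases f with
    | zero => omega
    | succ f =>
      rw [List.nil_append, pv_go_step, pv_isp, if_pos (by simp), pv_go_zero]
      simp
  | cons c hs ih =>
    cases f with
    | zero => omega
    | succ f =>
      rw [List.cons_append, pv_go_step, pv_isp, if_neg (pv_nesp hh)]
      rw [ih f (c :: cur) (by simpa using Nat.lt_of_succ_lt_succ hf) (pv_notin_tail hh)]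
      simp

theorem pv_split1_nospace {t : List Char} (hns : ' ' ∉ t) :
    PySem.Chars.splitOnMax t [' '] 1 = [t] := by
  show (if (1:Int) < 0 then _ else PySem.Chars.splitOnMax.go [' '] (t.length + 1) (1:Int).toNat t [] []) = _
  rw [if_neg (by norm_num)]
  show PySem.Chars.splitOnMax.go [' '] (t.length + 1) 1 t [] [] = _
  rw [pv_go_nospace _ _ _ _ (by omega) hns]
  simp

theorem pv_split1_split {h r : List Char} (hh : ' ' ∉ h) :
    PySem.Chars.splitOnMax (h ++ ' ' :: r) [' '] 1 = [h, r] := by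
  show (if (1:Int) < 0 then _
        else PySem.Chars.splitOnMax.go [' '] ((h ++ ' ' :: r).length + 1) (1:Int).toNat (h ++ ' ' :: r) [] []) = _
  rw [if_neg (by norm_num)]
  show PySem.Chars.splitOnMax.go [' '] ((h ++ ' ' :: r).length + 1) 1 (h ++ ' ' :: r) [] [] = _
  rw [pv_go_split _ _ _ _ _ (by simp) hh]
  simp

-- ---- replace(' ', '-') is the identity on space-free strings ----
theorem pv_rgo_step (f : Nat) (c : Char) (rest acc : List Char) :
    PySem.Chars.replace.go [' '] ['-'] (f+1) (c::rest) acc =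
      if ([' ']).isPrefixOf (c::rest) then PySem.Chars.replace.go [' '] ['-'] f rest ('-'::acc)
      else PySem.Chars.replace.go [' '] ['-'] f rest (c::acc) := rfl

theorem pv_rgo_nospace (f : Nat) (l acc : List Char) (hl : ' ' ∉ l) :
    PySem.Chars.replace.go [' '] ['-'] f l acc = acc.reverse ++ l := by
  induction f generalizing l acc with
  | zero => rfl
  | succ f ih =>
    cases l with
    | nil => show acc.reverse = _; simp
    | cons c rest =>
      rw [pv_rgo_step, pv_isp, if_neg (pv_nesp hl)]
      rw [ih rest (c :: acc) (pv_notin_tail hl)]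
      simp

theorem pv_repnoop {s : List Char} (hs : ' ' ∉ s) :
    PySem.Chars.replace s [' '] ['-'] = s := by
  show (if ([' '] : List Char).isEmpty then _ else PySem.Chars.replace.go [' '] ['-'] s.length s []) = _
  rw [if_neg (by simp)]
  rw [pv_rgo_nospace _ _ _ hs]
  simp

-- ---- strip eats a leading space ----
theorem pv_strip_cons (x : List Char) : PySem.Chars.strip (' ' :: x) = PySem.Chars.strip x := by
  simp [PySem.Chars.strip, PySem.Chars.lstrip,
        show PySem.Chars.isspace ' ' = true from by decide]

-- ---- the keys of MAKE_MAP ----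
theorem pv_spacekeys : ∀ k ∈ pvMakeMap.keys, ' ' ∈ k →
    k = "alfa romeo".toList ∨ k = "land rover".toList := by decide

theorem pv_contains_iff (k : List Char) : pvMakeMap.contains k = true ↔ k ∈ pvMakeMap.keys := by
  rw [PySem.Dict.contains_eq_decide_mem_keys]; simp

-- whenever some key+' ' is a prefix of h++' '::r
theorem pv_prefix_key {h r k : List Char} (hh : ' ' ∉ h) (hk : k ∈ pvMakeMap.keys)
    (hp : (k ++ [' ']) <+: (h ++ ' ' :: r)) :
    k = h ∨ (k = "alfa romeo".toList ∧ h = "alfa".toList ∧ ("romeo".toList ++ [' ']) <+: r)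
        ∨ (k = "land rover".toList ∧ h = "land".toList ∧ ("rover".toList ++ [' ']) <+: r) := by
  by_cases hsk : ' ' ∈ k
  · rcases pv_spacekeys k hk hsk with rfl | rfl
    · right; left
      have hp' : ("alfa".toList ++ ' ' :: ("romeo".toList ++ [' '])) <+: (h ++ ' ' :: r) := by
        simpa using hp
      have := pv_splitEq (by decide) hh hp'
      exact ⟨rfl, this.1.symm, this.2⟩
    · right; right
      have hp' : ("land".toList ++ ' ' :: ("rover".toList ++ [' '])) <+: (h ++ ' ' :: r) := by
        simpa using hp
      have := pv_splitEq (by decide) hh hp'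
      exact ⟨rfl, this.1.symm, this.2⟩
  · left; exact (pv_sp hsk hh).mp hp

-- ---- the loop of A ----
theorem pv_loopA_none (t : List Char) (ks : List (List Char))
    (hno : ∀ k ∈ ks, ¬ ((k ++ [' ']) <+: t)) : pvLoopA t ks = none := by
  induction ks with
  | nil => rfl
  | cons k ks ih =>
    rw [pvLoopA, if_neg]
    · exact ih (fun k' hk' => hno k' (List.mem_cons_of_mem _ hk'))
    · simp only [PySem.Chars.startswith_iff]
      exact hno k (List.mem_cons_self ..)

theorem pv_loopA_found (t : List Char) (k0 : List Char) (ks : List (List Char))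
    (hnd : ks.Nodup) (hmem : k0 ∈ ks) (hp : (k0 ++ [' ']) <+: t)
    (huniq : ∀ k ∈ ks, (k ++ [' ']) <+: t → k = k0) :
    pvLoopA t ks =
      (if PySem.Chars.strip (PySem.Chars.slice t (some (k0.length : Int))) ≠ [] then
        some (PySem.Chars.replace k0 [' '] ['-'],
              PySem.Chars.replace (PySem.Chars.strip (PySem.Chars.slice t (some (k0.length : Int)))) [' '] ['-'],
              pvMakeMap.getD k0 [],
              pvTitleFirst (PySem.Chars.strip (PySem.Chars.slice t (some (k0.length : Int)))))
      else none) := by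
  induction ks with
  | nil => simp at hmem
  | cons k ks ih =>
    by_cases hk : k = k0
    · subst hk
      rw [pvLoopA, if_pos (by simpa only [PySem.Chars.startswith_iff] using hp)]
      by_cases hrem : PySem.Chars.strip (PySem.Chars.slice t (some (k.length : Int))) ≠ []
      · rw [if_pos hrem, if_pos hrem]
      · rw [if_neg hrem, if_neg hrem]
        apply pv_loopA_none
        intro k' hk' hp'
        have hk'k : k' = k := huniq k' (List.mem_cons_of_mem _ hk') hp'
        exact (List.nodup_cons.mp hnd).1 (hk'k ▸ hk')
    · rw [pvLoopA, if_neg]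
      · exact ih (List.nodup_cons.mp hnd).2
          (by
            rcases List.mem_cons.mp hmem with h | h
            · exact absurd h.symm hk
            · exact h)
          (fun k' hk' hp' => huniq k' (List.mem_cons_of_mem _ hk') hp')
      · simp only [PySem.Chars.startswith_iff]
        intro hpk
        exact hk (huniq k (List.mem_cons_self ..) hpk)

-- facts about the sorted key list
theorem pv_sorted_mem (k : List Char) :
    k ∈ PySem.List.sorted pvMakeMap.keys (fun k => k.length) true ↔ k ∈ pvMakeMap.keys :=
  PySem.List.mem_sorted _ _ _ _

theorem pv_sorted_nodup : (PySem.List.sorted pvMakeMap.keys (fun k => k.length) true).Nodup :=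
  (PySem.List.sorted_perm pvMakeMap.keys (fun k => k.length) true).symm.nodup (by decide)

-- ===== the main equivalence on the stripped, lowered term =====
theorem pv_main_eq (t : List Char) : pvMainA t = pvMainB t := by
  rcases pv_firstSpace t with hns | ⟨h, r, rfl, hh⟩
  · -- no space: the loop finds nothing, split gives one part, both return the Nones
    have hloop : pvLoopA t (PySem.List.sorted pvMakeMap.keys (fun k => k.length) true) = none := by
      apply pv_loopA_none
      intro k _ hp
      exact hns (hp.subset (by simp))
    rw [pvMainA, hloop, pvAfterLoopA, pvMainB.eq_def, pv_split1_nospace hns]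
  · have hsplit := pv_split1_split (r := r) hh
    have hdrop : PySem.Chars.strip (PySem.Chars.slice (h ++ ' ' :: r) (some (h.length : Int))) =
        PySem.Chars.strip r := by
      rw [PySem.Chars.slice_eq_listSlice, PySem.List.slice_from _ (by positivity)]
      simp only [Int.toNat_natCast]
      rw [show (h ++ ' ' :: r).drop h.length = ' ' :: r from List.drop_left]
      exact pv_strip_cons r
    rcases pv_firstSpace r with hnr | ⟨w, r2, rfl, hw⟩
    · -- tail has no further space: only a single-word make can match
      by_cases hcm : h ∈ pvMakeMap.keys
      · have hch : pvMakeMap.contains h = true := (pv_contains_iff h).mpr hcm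
        have hloop := pv_loopA_found (h ++ ' ' :: r) h
          (PySem.List.sorted pvMakeMap.keys (fun k => k.length) true) pv_sorted_nodup
          ((pv_sorted_mem h).mpr hcm) ((pv_sp hh hh).mpr rfl)
          (by
            intro k hk hp
            rcases pv_prefix_key hh ((pv_sorted_mem k).mp hk) hp with hkh | ⟨-, -, hpr⟩ | ⟨-, -, hpr⟩
            · exact hkh
            · exact absurd (hpr.subset (by simp)) hnr
            · exact absurd (hpr.subset (by simp)) hnr)
        rw [pvMainA, hloop, hdrop, pvMainB.eq_def, hsplit]
        simp only []
        rw [pv_split1_nospace hnr]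
        simp only []
        rw [pvSingleB, hch, if_pos (rfl : (true : Bool) = true)]
        by_cases hrem : PySem.Chars.strip r ≠ []
        · rw [if_pos hrem, if_pos hrem, pvAfterLoopA, pv_repnoop hh, pvWrapB]
        · rw [if_neg hrem, if_neg hrem, pvAfterLoopA, hsplit, pvFallB, pvWrapB]
      · have hch : pvMakeMap.contains h = false := by
          rw [Bool.eq_false_iff]
          intro hc
          exact hcm ((pv_contains_iff h).mp hc)
        have hloop : pvLoopA (h ++ ' ' :: r)
            (PySem.List.sorted pvMakeMap.keys (fun k => k.length) true) = none := by
          apply pv_loopA_none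
          intro k hk hp
          rcases pv_prefix_key hh ((pv_sorted_mem k).mp hk) hp with rfl | ⟨-, -, hpr⟩ | ⟨-, -, hpr⟩
          · exact hcm ((pv_sorted_mem k).mp hk)
          · exact absurd (hpr.subset (by simp)) hnr
          · exact absurd (hpr.subset (by simp)) hnr
        rw [pvMainA, hloop, pvAfterLoopA, pvMainB.eq_def, hsplit]
        simp only []
        rw [pv_split1_nospace hnr]
        simp only []
        rw [pvSingleB, hch, if_neg Bool.false_ne_true, pvFallB, pvWrapB]
    · -- tail splits as w ++ ' ' :: r2
      have hsplitr := pv_split1_split (r := r2) hw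
      by_cases htk : (h ++ ' ' :: w) ∈ pvMakeMap.keys
      · -- a two-word make matches; it must be "alfa romeo" or "land rover"
        have hsp2 : ' ' ∈ h ++ ' ' :: w := by simp
        have hctk : pvMakeMap.contains (h ++ ' ' :: w) = true := (pv_contains_iff _).mpr htk
        have hha : h ∉ pvMakeMap.keys := by
          rcases pv_spacekeys _ htk hsp2 with hk2 | hk2
          · obtain ⟨rfl, -⟩ :=
              pv_eqSplit (b := "alfa".toList) (y := "romeo".toList) hh (by decide) (by rw [hk2]; decide)
            decide
          · obtain ⟨rfl, -⟩ :=
              pv_eqSplit (b := "land".toList) (y := "rover".toList) hh (by decide) (by rw [hk2]; decide)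
            decide
        have hch : pvMakeMap.contains h = false := by
          rw [Bool.eq_false_iff]
          intro hc
          exact hha ((pv_contains_iff h).mp hc)
        have hpre : ((h ++ ' ' :: w) ++ [' ']) <+: (h ++ ' ' :: (w ++ ' ' :: r2)) := by
          rw [show (h ++ ' ' :: (w ++ ' ' :: r2)) = ((h ++ ' ' :: w) ++ [' ']) ++ r2 by simp]
          exact List.prefix_append _ _
        have hdrop2 : PySem.Chars.strip (PySem.Chars.slice (h ++ ' ' :: (w ++ ' ' :: r2))
            (some ((h ++ ' ' :: w).length : Int))) = PySem.Chars.strip r2 := by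
          rw [PySem.Chars.slice_eq_listSlice, PySem.List.slice_from _ (by positivity)]
          simp only [Int.toNat_natCast]
          rw [show (h ++ ' ' :: (w ++ ' ' :: r2)) = (h ++ ' ' :: w) ++ ' ' :: r2 by simp]
          rw [List.drop_left]
          exact pv_strip_cons r2
        have huniq : ∀ k ∈ PySem.List.sorted pvMakeMap.keys (fun k => k.length) true,
            (k ++ [' ']) <+: (h ++ ' ' :: (w ++ ' ' :: r2)) → k = h ++ ' ' :: w := by
          intro k hk hp
          rcases pv_prefix_key hh ((pv_sorted_mem k).mp hk) hp with rfl | ⟨rfl, rfl, -⟩ | ⟨rfl, rfl, -⟩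
          · exact absurd ((pv_sorted_mem k).mp hk) hha
          · rcases pv_spacekeys _ htk hsp2 with hk2 | hk2
            · rw [hk2]
            · exact absurd (pv_eqSplit (a := "alfa".toList) (b := "land".toList) (x := w)
                (y := "rover".toList) (by decide) (by decide) (by rw [hk2]; decide)).1 (by decide)
          · rcases pv_spacekeys _ htk hsp2 with hk2 | hk2
            · exact absurd (pv_eqSplit (a := "land".toList) (b := "alfa".toList) (x := w)
                (y := "romeo".toList) (by decide) (by decide) (by rw [hk2]; decide)).1 (by decide)
            · rw [hk2]
        have hloop := pv_loopA_found (h ++ ' ' :: (w ++ ' ' :: r2)) (h ++ ' ' :: w)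
          (PySem.List.sorted pvMakeMap.keys (fun k => k.length) true) pv_sorted_nodup
          ((pv_sorted_mem _).mpr htk) hpre huniq
        rw [pvMainA, hloop, hdrop2, pvMainB.eq_def, hsplit]
        simp only []
        rw [hsplitr]
        simp only []
        rw [hctk, if_pos (rfl : (true : Bool) = true)]
        by_cases hrem : PySem.Chars.strip r2 ≠ []
        · rw [if_pos hrem, if_pos hrem, pvAfterLoopA, pvWrapB]
        · rw [if_neg hrem, if_neg hrem, pvAfterLoopA, hsplit, pvSingleB, hch,
            if_neg Bool.false_ne_true, pvFallB, pvWrapB]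
      · -- the first two words are not a make
        have hctk : pvMakeMap.contains (h ++ ' ' :: w) = false := by
          rw [Bool.eq_false_iff]
          intro hc
          exact htk ((pv_contains_iff _).mp hc)
        by_cases hcm : h ∈ pvMakeMap.keys
        · have hch : pvMakeMap.contains h = true := (pv_contains_iff h).mpr hcm
          have hha : h ≠ "alfa".toList ∧ h ≠ "land".toList := by
            constructor <;> rintro rfl <;> revert hcm <;> decide
          have hloop := pv_loopA_found (h ++ ' ' :: (w ++ ' ' :: r2)) h
            (PySem.List.sorted pvMakeMap.keys (fun k => k.length) true) pv_sorted_nodup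
            ((pv_sorted_mem h).mpr hcm) ((pv_sp hh hh).mpr rfl)
            (by
              intro k hk hp
              rcases pv_prefix_key hh ((pv_sorted_mem k).mp hk) hp with rfl | ⟨-, heq, -⟩ | ⟨-, heq, -⟩
              · rfl
              · exact absurd heq hha.1
              · exact absurd heq hha.2)
          rw [pvMainA, hloop, hdrop, pvMainB.eq_def, hsplit]
          simp only []
          rw [hsplitr]
          simp only []
          rw [hctk, if_neg Bool.false_ne_true, pvSingleB, hch, if_pos (rfl : (true : Bool) = true)]
          by_cases hrem : PySem.Chars.strip (w ++ ' ' :: r2) ≠ []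
          · rw [if_pos hrem, if_pos hrem, pvAfterLoopA, pv_repnoop hh, pvWrapB]
          · rw [if_neg hrem, if_neg hrem, pvAfterLoopA, hsplit, pvFallB, pvWrapB]
        · have hch : pvMakeMap.contains h = false := by
            rw [Bool.eq_false_iff]
            intro hc
            exact hcm ((pv_contains_iff h).mp hc)
          have hloop : pvLoopA (h ++ ' ' :: (w ++ ' ' :: r2))
              (PySem.List.sorted pvMakeMap.keys (fun k => k.length) true) = none := by
            apply pv_loopA_none
            intro k hk hp
            rcases pv_prefix_key hh ((pv_sorted_mem k).mp hk) hp with rfl | ⟨rfl, rfl, hpr⟩ | ⟨rfl, rfl, hpr⟩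
            · exact hcm ((pv_sorted_mem k).mp hk)
            · have hwr : "romeo".toList = w := (pv_sp (by decide) hw).mp hpr
              exact htk (by rw [← hwr]; decide)
            · have hwr : "rover".toList = w := (pv_sp (by decide) hw).mp hpr
              exact htk (by rw [← hwr]; decide)
          rw [pvMainA, hloop, pvAfterLoopA, pvMainB.eq_def, hsplit]
          simp only []
          rw [hsplitr]
          simp only []
          rw [hctk, if_neg Bool.false_ne_true, pvSingleB, hch, if_neg Bool.false_ne_true, pvFallB, pvWrapB]

-- ===== VERDICT (by name: the statement is the Claim_ definition above) =====
theorem term_to_parts_py_spec : Claim_equal_term_to_parts_py := by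
  intro term _
  unfold Spec_term_to_parts_py term_to_parts_py term_to_parts_py_alt
  exact pv_main_eq _
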